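-- pv_equiv track=rewrite | github.com/Jara-rk1/pages | newsletter-games/generate_qr.py | encode_data_codewords
-- ===== SOURCE A (Python) =====
-- from typing import List, Tuple, Optional
--
-- VERSION_TABLE = {
--     # ver: (size, total_data_cw, ec_cw_per_block, nblocks_g1, dcw_g1, nblocks_g2, dcw_g2)
--     # Source: ISO/IEC 18004, Table 9 -- EC level M
--     # total_data_cw = total codewords available for data (excl. EC)
--     # For V1: 26 total cw, 10 EC cw => 16 data cw, 1 block of 16
--     # For V2: 44 total cw, 16 EC cw => 28 data cw, 1 block of 28
--     # For V3: 70 total cw, 26 EC cw => 44 data cw, 1 block of 44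
--     # For V4: 100 total cw, 36 EC cw => 64 data cw, 2 blocks of 32
--     # For V5: 134 total cw, 48 EC cw => 86 data cw, 2 blocks of 43
--     # For V6: 172 total cw, 64 EC cw => 108 data cw, 4 blocks (2x27 + 2x28)
--     1: (21, 16, 10, 1, 16, 0, 0),
--     2: (25, 28, 16, 1, 28, 0, 0),
--     3: (29, 44, 26, 1, 44, 0, 0),
--     4: (33, 64, 18, 2, 32, 0, 0),
--     5: (37, 86, 24, 2, 43, 0, 0),
--     6: (41, 108, 16, 2, 27, 2, 28),
-- }
--
-- def encode_data_codewords(text: str, version: int) -> List[int]: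
--     """
--     Encode *text* into QR data codewords (byte mode, EC level M).
--
--     Structure:
--         [mode indicator 4 bits][char count 8 bits (v1-9)][data bytes][terminator][padding]
--
--     Returns a list of codeword integers.
--     """
--     data_bytes = text.encode("utf-8")
--     data_len = len(data_bytes)
--
--     info = VERSION_TABLE[version]
--     total_data_cw = info[1]  # total data codewords (before EC)
--
--     # Build the bit stream
--     bits: List[int] = []  # list of 0/1
--
--     def add_bits(value: int, length: int) -> None:
--         for i in range(length - 1, -1, -1):
--             bits.append((value >> i) & 1)
--
--     # Mode indicator: byte mode = 0100
--     add_bits(0b0100, 4)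
--
--     # Character count indicator: 8 bits for versions 1-9
--     add_bits(data_len, 8)
--
--     # Data bytes
--     for b in data_bytes:
--         add_bits(b, 8)
--
--     # Terminator: up to 4 zero bits (don't exceed total capacity)
--     total_bits = total_data_cw * 8
--     terminator_len = min(4, total_bits - len(bits))
--     add_bits(0, terminator_len)
--
--     # Pad to byte boundary
--     while len(bits) % 8 != 0:
--         bits.append(0)
--
--     # Convert bits to codewords
--     codewords: List[int] = []
--     for i in range(0, len(bits), 8):
--         byte_val = 0
--         for j in range(8):
--             byte_val = (byte_val << 1) | bits[i + j]
--         codewords.append(byte_val)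
--
--     # Pad with alternating 0xEC / 0x11 to fill total_data_cw
--     pad_bytes = [0xEC, 0x11]
--     idx = 0
--     while len(codewords) < total_data_cw:
--         codewords.append(pad_bytes[idx % 2])
--         idx += 1
--
--     return codewords
-- ===== SOURCE B (Python) =====
-- from typing import List
--
-- VERSION_TABLE = {
--     1: (21, 16, 10, 1, 16, 0, 0),
--     2: (25, 28, 16, 1, 28, 0, 0),
--     3: (29, 44, 26, 1, 44, 0, 0),
--     4: (33, 64, 18, 2, 32, 0, 0),
--     5: (37, 86, 24, 2, 43, 0, 0),
--     6: (41, 108, 16, 2, 27, 2, 28),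
-- }
--
-- def encode_data_codewords(text: str, version: int) -> List[int]:
--     """Byte-mode QR data codewords, computed directly by nibble arithmetic
--     (no intermediate bit list): every codeword is (previous low nibble)*16 +
--     (current high nibble), starting from the mode/length header."""
--     total_data_cw = VERSION_TABLE[version][1]
--     data = text.encode("utf-8")
--     n = len(data)
--     out = [0x40 + (n // 16) % 16]
--     carry = n % 16
--     for b in data:
--         out.append(carry * 16 + b // 16)
--         carry = b % 16
--     out.append(carry * 16)
--     pad = total_data_cw - len(out)
--     return out + [0xEC if i % 2 == 0 else 0x11 for i in range(pad)]
-- ===== Notes on version B (the rewrite author's own statement) =====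
-- stated objective: alternative
-- what changed: B drops A's intermediate 0/1 bit list entirely and computes each codeword directly by nibble arithmetic (carry of the previous low nibble times 16 plus the next high nibble), then appends the alternating 0xEC/0x11 padding in one list comprehension.
import Mathlib
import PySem

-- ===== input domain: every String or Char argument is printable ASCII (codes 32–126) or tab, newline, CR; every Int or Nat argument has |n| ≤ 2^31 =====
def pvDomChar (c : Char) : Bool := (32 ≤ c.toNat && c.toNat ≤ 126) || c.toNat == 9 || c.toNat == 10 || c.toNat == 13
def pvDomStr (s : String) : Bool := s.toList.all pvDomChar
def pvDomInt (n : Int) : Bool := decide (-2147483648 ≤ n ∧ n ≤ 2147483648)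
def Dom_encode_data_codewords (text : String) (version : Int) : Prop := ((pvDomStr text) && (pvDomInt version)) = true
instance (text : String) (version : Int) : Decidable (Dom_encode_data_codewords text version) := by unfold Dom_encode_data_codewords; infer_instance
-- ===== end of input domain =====

-- B replaces A's bit-list construction by direct nibble arithmetic on codewords (alternative decomposition, same result).


-- ===== PORT A =====
-- VERSION_TABLE (shared module constant, used by both ports for the lookup)
def pvVersionTable : PySem.Dict Int (Int × Int × Int × Int × Int × Int × Int) :=
  PySem.Dict.ofList
    [(1, (21, 16, 10, 1, 16, 0, 0)),
     (2, (25, 28, 16, 1, 28, 0, 0)),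
     (3, (29, 44, 26, 1, 44, 0, 0)),
     (4, (33, 64, 18, 2, 32, 0, 0)),
     (5, (37, 86, 24, 2, 43, 0, 0)),
     (6, (41, 108, 16, 2, 27, 2, 28))]

-- add_bits(value, length): for i in range(length-1, -1, -1): bits.append((value >> i) & 1)
-- (i ≥ 0 on every executed iteration, so 'i.toNat' is exact)
def pvAddBits (bits : List Int) (value : Int) (length : Int) : List Int :=
  (PySem.List.pyRange (length - 1) (-1) (-1)).foldl
    (fun bs i => bs ++ [PySem.Int.band (value >>> i.toNat) 1]) bits

-- while len(bits) % 8 != 0: bits.append(0)   (fuel 8 bounds the ≤ 7 possible iterations)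
def pvPadByteLoop : Nat → List Int → List Int
  | 0, bits => bits
  | fuel + 1, bits => if bits.length % 8 ≠ 0 then pvPadByteLoop fuel (bits ++ [0]) else bits

-- while len(codewords) < total: codewords.append(pad_bytes[idx % 2]); idx += 1
-- (fuel total.toNat bounds the iteration count)
def pvPadCwLoop (total : Int) : Nat → Nat → List Int → List Int
  | 0, _, cws => cws
  | fuel + 1, idx, cws =>
    if (cws.length : Int) < total then
      pvPadCwLoop total fuel (idx + 1) (cws ++ [if idx % 2 = 0 then (0xEC : Int) else 0x11])
    else cws

-- body of A after the table lookup, on the utf-8 bytes and total_data_cw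
def pvEncodeA (data_bytes : List Int) (total_data_cw : Int) : List Int :=
  let data_len : Int := data_bytes.length
  let bits := pvAddBits [] 4 4
  let bits := pvAddBits bits data_len 8
  let bits := data_bytes.foldl (fun bs b => pvAddBits bs b 8) bits
  let total_bits := total_data_cw * 8
  let bits := pvAddBits bits 0 (min 4 (total_bits - (bits.length : Int)))
  let bits := pvPadByteLoop 8 bits
  let codewords := (PySem.List.pyRange 0 (bits.length : Int) 8).foldl
    (fun cws i => cws ++
      [(List.range 8).foldl
        (fun bv (j : Nat) => PySem.Int.bor (bv <<< (1 : Nat)) (PySem.List.pyGetD bits (i + (j : Int)) 0)) 0])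
    []
  pvPadCwLoop total_data_cw total_data_cw.toNat 0 codewords

def encode_data_codewords (text : String) (version : Int) : List Int :=
  -- text.encode("utf-8"): exact on the printable-ASCII/tab/newline/CR domain
  let data_bytes := text.toList.map (fun c => (c.toNat : Int))
  match PySem.Dict.get? pvVersionTable version with
  | none => []  -- Python raises KeyError here; excluded by Pre_
  | some info => pvEncodeA data_bytes info.2.1

-- ===== PORT B =====
-- body of B after the table lookup
def pvEncodeB (data : List Int) (total_data_cw : Int) : List Int :=
  let n : Int := data.length
  let st := data.foldl
    (fun (st : List Int × Int) b =>
      (st.1 ++ [st.2 * 16 + PySem.Int.floordiv b 16], PySem.Int.mod b 16))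
    ([0x40 + PySem.Int.mod (PySem.Int.floordiv n 16) 16], PySem.Int.mod n 16)
  let out := st.1 ++ [st.2 * 16]
  let pad := total_data_cw - (out.length : Int)
  out ++ (PySem.List.pyRange 0 pad 1).map
    (fun i => if PySem.Int.mod i 2 = 0 then (0xEC : Int) else 0x11)

def encode_data_codewords_alt (text : String) (version : Int) : List Int :=
  match PySem.Dict.get? pvVersionTable version with
  | none => []  -- Python raises KeyError here; excluded by Pre_
  | some info => pvEncodeB (text.toList.map (fun c => (c.toNat : Int))) info.2.1

-- ===== PRECONDITION & SPEC =====
-- Pre_ excludes exactly the versions absent from VERSION_TABLE, on which A (and B) raise KeyError.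
def Pre_encode_data_codewords (text : String) (version : Int) : Prop := 1 ≤ version ∧ version ≤ 6
instance (text : String) (version : Int) : Decidable (Pre_encode_data_codewords text version) := by
  unfold Pre_encode_data_codewords; infer_instance
def pvWitness_encode_data_codewords : String × Int := ("HI", 1)

def Spec_encode_data_codewords (text : String) (version : Int) (out : List Int) : Prop := out = encode_data_codewords_alt text version
instance (text : String) (version : Int) (out : List Int) : Decidable (Spec_encode_data_codewords text version out) := by unfold Spec_encode_data_codewords; infer_instance

-- ===== CLAIM (what is proved, stated in full; the proofs are below) =====
def Claim_equal_encode_data_codewords : Prop := ∀ (text : String) (version : Int), Dom_encode_data_codewords text version → Pre_encode_data_codewords text version → Spec_encode_data_codewords text version (encode_data_codewords text version)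

-- ===== LEMMAS AND PROOFS =====

-- bit i of v, as A's add_bits extracts it
def pvBit (i : Nat) (v : Int) : Int := PySem.Int.band (v >>> (i : Int)) 1

def pvToBits8 (v : Int) : List Int :=
  [pvBit 7 v, pvBit 6 v, pvBit 5 v, pvBit 4 v, pvBit 3 v, pvBit 2 v, pvBit 1 v, pvBit 0 v]

lemma pvBit_eq (i : Nat) (v : Int) (hv : 0 ≤ v) : pvBit i v = (v / (2 ^ i : Nat)) % 2 := by
  unfold pvBit
  rw [PySem.Int.band_one, Int.shiftRight_natCast_right, Int.shiftRight_eq_div_pow,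
    PySem.Int.mod_eq_emod_of_pos (by norm_num)]

lemma pvAddBits_eight (bs : List Int) (v : Int) : pvAddBits bs v 8 = bs ++ pvToBits8 v := by
  unfold pvAddBits pvToBits8
  rw [show PySem.List.pyRange (8 - 1) (-1) (-1) = [7, 6, 5, 4, 3, 2, 1, 0] from by decide]
  simp [List.foldl, pvBit, Int.shiftRight_natCast_right, List.append_assoc]

lemma pvAddBits_four (bs : List Int) (v : Int) :
    pvAddBits bs v 4 = bs ++ [pvBit 3 v, pvBit 2 v, pvBit 1 v, pvBit 0 v] := by
  unfold pvAddBits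
  rw [show PySem.List.pyRange (4 - 1) (-1) (-1) = [3, 2, 1, 0] from by decide]
  simp [List.foldl, pvBit, Int.shiftRight_natCast_right, List.append_assoc]

lemma pvAddBits_nonpos (bs : List Int) (v L : Int) (h : L ≤ 0) : pvAddBits bs v L = bs := by
  unfold pvAddBits
  rw [PySem.List.pyRange_neg_one_eq_reverse,
    PySem.List.pyRange_one_eq_nil (by omega)]
  rfl

lemma pvFoldAddBits (data : List Int) (init : List Int) :
    data.foldl (fun bs b => pvAddBits bs b 8) init = init ++ data.flatMap pvToBits8 := by
  induction data generalizing init with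
  | nil => simp
  | cons b t ih => simp [List.foldl, pvAddBits_eight, ih, List.flatMap_cons, List.append_assoc, List.flatMap]

lemma pvFlatMap_len (data : List Int) : (data.flatMap pvToBits8).length = 8 * data.length := by
  induction data with
  | nil => simp
  | cons b t ih => simp [List.flatMap_cons, ih, pvToBits8]; ring

lemma pvPadByte_zero (bs : List Int) (h : bs.length % 8 = 0) : pvPadByteLoop 8 bs = bs := by
  unfold pvPadByteLoop
  simp [h]

lemma pvPadByte_four (bs : List Int) (h : bs.length % 8 = 4) :
    pvPadByteLoop 8 bs = bs ++ [0, 0, 0, 0] := by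
  have h1 : bs.length % 8 ≠ 0 := by omega
  have h2 : (bs.length + 1) % 8 ≠ 0 := by omega
  have h3 : (bs.length + 1 + 1) % 8 ≠ 0 := by omega
  have h4 : (bs.length + 1 + 1 + 1) % 8 ≠ 0 := by omega
  have h5 : (bs.length + 1 + 1 + 1 + 1) % 8 = 0 := by omega
  simp [pvPadByteLoop, h1, h2, h3, h4, h5, List.append_assoc]

-- value packed by the inner byte loop
def pvPack (chunk : List Int) : Int :=
  chunk.foldl (fun bv b => PySem.Int.bor (bv <<< (1 : Nat)) b) 0

def pvBitsVal : List Int → Int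
  | [] => 0
  | b :: t => b * 2 ^ t.length + pvBitsVal t

lemma pvTwoMulLorOne (m : Nat) : 2 * m ||| 1 = 2 * m + 1 := by
  apply Nat.eq_of_testBit_eq
  intro i
  cases i with
  | zero =>
    simp [Nat.testBit_or, Nat.testBit_zero]
  | succ j =>
    simp only [Nat.testBit_or]
    simp only [Nat.testBit_add_one]
    rw [show 2 * m / 2 = m from by omega, show (2 * m + 1) / 2 = m from by omega,
      show (1 : Nat) / 2 = 0 from by omega]
    simp

lemma pvStepOr (bv a : Int) (hbv : 0 ≤ bv) (ha : a = 0 ∨ a = 1) :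
    PySem.Int.bor (bv <<< (1 : Nat)) a = 2 * bv + a := by
  rcases ha with h | h <;> subst h
  · simp [Int.shiftLeft_eq]; ring
  · rw [Int.shiftLeft_eq, PySem.Int.bor_of_nonneg (by positivity) (by norm_num)]
    have : (bv * 2 ^ 1).toNat = 2 * bv.toNat := by
      rw [Int.toNat_mul (by omega) (by norm_num)]; simp [Nat.mul_comm]
    rw [this, show ((1 : Int)).toNat = 1 from rfl, pvTwoMulLorOne]
    omega

lemma pvPack_foldl (l : List Int) (hl : ∀ x ∈ l, x = 0 ∨ x = 1) (acc : Int) (hacc : 0 ≤ acc) :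
    l.foldl (fun bv b => PySem.Int.bor (bv <<< (1 : Nat)) b) acc = acc * 2 ^ l.length + pvBitsVal l := by
  induction l generalizing acc with
  | nil => simp [pvBitsVal]
  | cons b t ih =>
    have hb := hl b (by simp)
    rw [List.foldl_cons, pvStepOr acc b hacc hb,
      ih (fun x hx => hl x (by simp [hx])) (2 * acc + b) (by omega)]
    simp [pvBitsVal, List.length_cons]
    ring

lemma pvPack_eq (l : List Int) (hl : ∀ x ∈ l, x = 0 ∨ x = 1) : pvPack l = pvBitsVal l := by
  unfold pvPack
  rw [pvPack_foldl l hl 0 (le_refl 0)]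
  ring

lemma pvBit01 (i : Nat) (v : Int) (hv : 0 ≤ v) : pvBit i v = 0 ∨ pvBit i v = 1 := by
  rw [pvBit_eq i v hv]
  omega

-- the chunk list the final bit stream splits into (after the header byte)
def pvChunks : List Int → Int → List (List Int)
  | [], c => [[pvBit 3 c, pvBit 2 c, pvBit 1 c, pvBit 0 c, 0, 0, 0, 0]]
  | b :: t, c =>
      [pvBit 3 c, pvBit 2 c, pvBit 1 c, pvBit 0 c, pvBit 7 b, pvBit 6 b, pvBit 5 b, pvBit 4 b]
        :: pvChunks t b

lemma pvChunks_flatten (data : List Int) (c : Int) :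
    (pvChunks data c).flatten =
      [pvBit 3 c, pvBit 2 c, pvBit 1 c, pvBit 0 c] ++ data.flatMap pvToBits8 ++ [0, 0, 0, 0] := by
  induction data generalizing c with
  | nil => simp [pvChunks]
  | cons b t ih => simp [pvChunks, ih, pvToBits8, List.flatMap_cons]

lemma pvChunks_len8 (data : List Int) (c : Int) : ∀ ch ∈ pvChunks data c, ch.length = 8 := by
  induction data generalizing c with
  | nil => simp [pvChunks]
  | cons b t ih =>
    intro ch hch
    rcases List.mem_cons.1 hch with h | h
    · subst h; simp
    · exact ih b ch h

lemma pvChunks_length (data : List Int) (c : Int) : (pvChunks data c).length = data.length + 1 := by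
  induction data generalizing c with
  | nil => simp [pvChunks]
  | cons b t ih => simp [pvChunks, ih]

lemma pvFlatten_len8 (chunks : List (List Int)) (h : ∀ ch ∈ chunks, ch.length = 8) :
    chunks.flatten.length = 8 * chunks.length := by
  induction chunks with
  | nil => simp
  | cons c t ih =>
    simp [List.flatten_cons, h c (by simp), ih (fun x hx => h x (by simp [hx]))]
    ring

lemma pvPackAt (pre chunk post : List Int) (h : chunk.length = 8) :
    (List.range 8).foldl
      (fun bv (j : Nat) => PySem.Int.bor (bv <<< (1 : Nat))
        (PySem.List.pyGetD (pre ++ (chunk ++ post)) ((pre.length : Int) + (j : Int)) 0)) 0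
    = pvPack chunk := by
  have hg : ∀ j : Nat, j < 8 →
      PySem.List.pyGetD (pre ++ (chunk ++ post)) ((pre.length : Int) + (j : Int)) 0
        = chunk.getD j 0 := by
    intro j hj
    rw [show ((pre.length : Int) + (j : Int)) = ((pre.length + j : Nat) : Int) from by push_cast; ring,
      PySem.List.pyGetD_natCast, List.getD_append_right _ _ _ _ (by omega), Nat.add_sub_cancel_left,
      List.getD_append _ _ _ _ (by omega)]
  rcases chunk with _ | ⟨x0, _ | ⟨x1, _ | ⟨x2, _ | ⟨x3, _ | ⟨x4, _ | ⟨x5, _ | ⟨x6, _ | ⟨x7, _ | ⟨x8, t⟩⟩⟩⟩⟩⟩⟩⟩⟩ <;> simp at h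
  rw [show List.range 8 = [0, 1, 2, 3, 4, 5, 6, 7] from rfl]
  simp only [List.foldl_cons, List.foldl_nil]
  rw [hg 0 (by omega), hg 1 (by omega), hg 2 (by omega), hg 3 (by omega),
    hg 4 (by omega), hg 5 (by omega), hg 6 (by omega), hg 7 (by omega)]
  simp [pvPack, List.foldl, List.getD]

lemma pvConv (chunks : List (List Int)) : ∀ (pre bits : List Int),
    bits = pre ++ chunks.flatten → (∀ c ∈ chunks, c.length = 8) →
    (List.range chunks.length).map
      (fun (k : Nat) => (List.range 8).foldl
        (fun bv (j : Nat) => PySem.Int.bor (bv <<< (1 : Nat))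
          (PySem.List.pyGetD bits (((pre.length : Int) + 8 * (k : Int)) + (j : Int)) 0)) 0)
    = chunks.map pvPack := by
  induction chunks with
  | nil => simp
  | cons c t ih =>
    intro pre bits hbits h8
    have hc8 : c.length = 8 := h8 c (by simp)
    rw [List.length_cons,
      show List.range (t.length + 1) = 0 :: List.map Nat.succ (List.range t.length) from
        List.range_succ_eq_map, List.map_cons, List.map_map, List.map_cons]
    congr 1
    · simp only [Nat.cast_zero, mul_zero, add_zero]
      rw [hbits, List.flatten_cons]
      exact pvPackAt pre c t.flatten hc8
    · rw [← ih (pre ++ c) bits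
        (by rw [hbits, List.flatten_cons, List.append_assoc])
        (fun x hx => h8 x (by simp [hx]))]
      apply List.map_congr_left
      intro k _
      have hidx : (pre.length : Int) + 8 * ((Nat.succ k : Nat) : Int)
          = ((pre ++ c).length : Int) + 8 * (k : Int) := by
        push_cast [List.length_append, hc8]
        ring
      rw [Function.comp_apply, hidx]

-- B's nibble stream, as a structural recursion (proof-side)
def pvNibRun : List Int → Int → List Int
  | [], c => [c * 16]
  | b :: t, c => (c * 16 + b / 16) :: pvNibRun t (b % 16)

lemma pvChunks_vals (data : List Int) : ∀ (c : Int), 0 ≤ c →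
    (∀ b ∈ data, 0 ≤ b ∧ b ≤ 126) →
    (pvChunks data c).map pvPack = pvNibRun data (c % 16) := by
  induction data with
  | nil =>
    intro c hc _
    simp only [pvChunks, List.map_cons, List.map_nil, pvNibRun]
    congr 1
    rw [pvPack_eq _ (by
      intro x hx
      simp at hx
      rcases hx with rfl | rfl | rfl | rfl | rfl
      exacts [pvBit01 3 c hc, pvBit01 2 c hc, pvBit01 1 c hc, pvBit01 0 c hc, Or.inl rfl])]
    norm_num [pvBitsVal]
    rw [pvBit_eq 3 c hc, pvBit_eq 2 c hc, pvBit_eq 1 c hc, pvBit_eq 0 c hc]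
    norm_num
    omega
  | cons b t ih =>
    intro c hc hb
    have hb0 := hb b (by simp)
    simp only [pvChunks, List.map_cons, pvNibRun]
    congr 1
    · rw [pvPack_eq _ (by
        intro x hx
        simp at hx
        rcases hx with rfl | rfl | rfl | rfl | rfl | rfl | rfl | rfl
        exacts [pvBit01 3 c hc, pvBit01 2 c hc, pvBit01 1 c hc, pvBit01 0 c hc,
          pvBit01 7 b hb0.1, pvBit01 6 b hb0.1, pvBit01 5 b hb0.1, pvBit01 4 b hb0.1])]
      norm_num [pvBitsVal]
      rw [pvBit_eq 3 c hc, pvBit_eq 2 c hc, pvBit_eq 1 c hc, pvBit_eq 0 c hc,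
        pvBit_eq 7 b hb0.1, pvBit_eq 6 b hb0.1, pvBit_eq 5 b hb0.1, pvBit_eq 4 b hb0.1]
      norm_num
      have h126 := hb0.2
      omega
    · exact ih b hb0.1 (fun x hx => hb x (by simp [hx]))

lemma pvBFold (data : List Int) (acc : List Int) (c : Int) :
    (data.foldl
      (fun (st : List Int × Int) b =>
        (st.1 ++ [st.2 * 16 + PySem.Int.floordiv b 16], PySem.Int.mod b 16)) (acc, c)).1
      ++ [(data.foldl
      (fun (st : List Int × Int) b =>
        (st.1 ++ [st.2 * 16 + PySem.Int.floordiv b 16], PySem.Int.mod b 16)) (acc, c)).2 * 16]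
    = acc ++ pvNibRun data c := by
  induction data generalizing acc c with
  | nil => simp [pvNibRun]
  | cons b t ih =>
    rw [List.foldl_cons, ih]
    simp [pvNibRun, PySem.Int.floordiv_eq_ediv_of_pos (show (0:Int) < 16 by norm_num),
      PySem.Int.mod_eq_emod_of_pos (show (0:Int) < 16 by norm_num), List.append_assoc]

lemma pvPadCw (total : Int) (fuel : Nat) : ∀ (idx : Nat) (cws : List Int),
    total ≤ (cws.length : Int) + fuel →
    pvPadCwLoop total fuel idx cws =
      cws ++ (List.range (total - (cws.length : Int)).toNat).map
        (fun k => if (idx + k) % 2 = 0 then (0xEC : Int) else 0x11) := by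
  induction fuel with
  | zero =>
    intro idx cws h
    rw [show (total - (cws.length : Int)).toNat = 0 from by omega]
    simp [pvPadCwLoop]
  | succ f ih =>
    intro idx cws h
    by_cases hlt : (cws.length : Int) < total
    · have hstep : pvPadCwLoop total (f + 1) idx cws
          = pvPadCwLoop total f (idx + 1)
              (cws ++ [if idx % 2 = 0 then (0xEC : Int) else 0x11]) := by
        simp [pvPadCwLoop, hlt]
      rw [hstep, ih (idx + 1) _ (by simp; omega)]
      have hl1 : (((cws ++ [if idx % 2 = 0 then (0xEC : Int) else 0x11]).length : Int))
          = (cws.length : Int) + 1 := by simp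
      rw [hl1, List.append_assoc,
        show (total - (cws.length : Int)).toNat
          = (total - ((cws.length : Int) + 1)).toNat + 1 from by omega,
        List.range_succ_eq_map, List.map_cons, List.map_map]
      refine congrArg (cws ++ ·) ?_
      rw [List.singleton_append]
      refine congrArg₂ List.cons (by norm_num) ?_
      refine List.map_congr_left fun k _ => ?_
      simp only [Function.comp_apply, Nat.succ_eq_add_one]
      rw [show idx + (k + 1) = idx + 1 + k from by omega]
    · rw [show (total - (cws.length : Int)).toNat = 0 from by omega]
      simp [pvPadCwLoop, hlt]

lemma pvPadMaps (M : Int) :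
    (List.range M.toNat).map (fun k => if (0 + k) % 2 = 0 then (0xEC : Int) else 0x11)
    = (PySem.List.pyRange 0 M 1).map
        (fun i => if PySem.Int.mod i 2 = 0 then (0xEC : Int) else 0x11) := by
  by_cases h : 0 < M
  · obtain ⟨m, rfl⟩ : ∃ m : Nat, M = (m : Int) := ⟨M.toNat, by omega⟩
    rw [PySem.List.pyRange_zero_natCast, List.map_map, Int.toNat_natCast]
    refine List.map_congr_left fun k _ => ?_
    simp only [Function.comp_apply, Nat.zero_add]
    by_cases hk : k % 2 = 0
    · rw [if_pos (by omega), if_pos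
        (by rw [PySem.Int.mod_eq_emod_of_pos (by norm_num : (0:Int) < 2)]; omega)]
    · rw [if_neg (by omega), if_neg
        (by rw [PySem.Int.mod_eq_emod_of_pos (by norm_num : (0:Int) < 2)]; omega)]
  · rw [show M.toNat = 0 from by omega, PySem.List.pyRange_one_eq_nil (by omega)]
    simp

lemma pvHdrBits : ([pvBit 3 4, pvBit 2 4, pvBit 1 4, pvBit 0 4] : List Int) = [0, 1, 0, 0] := by
  rw [pvBit_eq 3 4 (by norm_num), pvBit_eq 2 4 (by norm_num),
    pvBit_eq 1 4 (by norm_num), pvBit_eq 0 4 (by norm_num)]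
  norm_num

lemma pvZeroBits : ([pvBit 3 0, pvBit 2 0, pvBit 1 0, pvBit 0 0] : List Int) = [0, 0, 0, 0] := by
  rw [pvBit_eq 3 0 (by norm_num), pvBit_eq 2 0 (by norm_num),
    pvBit_eq 1 0 (by norm_num), pvBit_eq 0 0 (by norm_num)]
  norm_num

set_option maxHeartbeats 1000000 in
lemma pvEncode_eq (data : List Int) (hb : ∀ b ∈ data, 0 ≤ b ∧ b ≤ 126)
    (total : Int) : pvEncodeA data total = pvEncodeB data total := by
  have hn : (0 : Int) ≤ (data.length : Int) := by positivity
  set n : Int := (data.length : Int) with hndef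
  set C : List (List Int) :=
    [0, 1, 0, 0, pvBit 7 n, pvBit 6 n, pvBit 5 n, pvBit 4 n] :: pvChunks data n with hC
  have hC8 : ∀ c ∈ C, c.length = 8 := by
    intro c hc
    rcases List.mem_cons.1 hc with rfl | hm
    · simp
    · exact pvChunks_len8 data n c hm
  have hClen : C.length = data.length + 2 := by
    rw [hC, List.length_cons, pvChunks_length]
  have hCflatlen : C.flatten.length = 8 * (data.length + 2) := by
    rw [pvFlatten_len8 C hC8, hClen]
  have hCflat : C.flatten
      = (([0, 1, 0, 0] ++ pvToBits8 n) ++ data.flatMap pvToBits8) ++ [0, 0, 0, 0] := by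
    rw [hC, List.flatten_cons, pvChunks_flatten]
    simp [pvToBits8]
  -- A side: the bit stream
  simp only [pvEncodeA]
  rw [pvAddBits_four, pvAddBits_eight, pvFoldAddBits, List.nil_append,
    pvHdrBits]
  have hlen3 : ((([0, 1, 0, 0] ++ pvToBits8 n) ++ data.flatMap pvToBits8)).length
      = 12 + 8 * data.length := by
    simp [pvToBits8, pvFlatMap_len]
    omega
  have hbits : pvPadByteLoop 8
      (pvAddBits (([0, 1, 0, 0] ++ pvToBits8 n) ++ data.flatMap pvToBits8) 0
        (min 4 (total * 8 - ((((([0, 1, 0, 0] ++ pvToBits8 n) ++ data.flatMap pvToBits8)).length : Nat) : Int))))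
      = C.flatten := by
    rw [hCflat, hlen3]
    by_cases hcap : n + 2 ≤ total
    · rw [min_eq_left (by push_cast; omega), pvAddBits_four,
        pvZeroBits]
      exact pvPadByte_zero _ (by rw [List.length_append, hlen3]; simp; omega)
    · rw [pvAddBits_nonpos _ _ _ (le_trans (min_le_right _ _) (by push_cast; omega))]
      exact pvPadByte_four _ (by rw [hlen3]; omega)
  rw [hbits]
  -- A side: bits → codewords
  rw [PySem.List.foldl_append_singleton_eq_map, List.nil_append]
  have hcount : (((((C.flatten.length : Nat) : Int)) - 0 + 8 - 1) / 8).toNat = C.length := by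
    rw [hCflatlen, hClen]
    push_cast
    omega
  have hrange : PySem.List.pyRange 0 ((C.flatten.length : Nat) : Int) 8
      = List.map (fun (k : Nat) => (0 : Int) + 8 * (k : Int)) (List.range C.length) := by
    rw [PySem.List.pyRange_of_pos _ _ (by norm_num),
      if_pos (by rw [hCflatlen]; push_cast; omega), hcount]
  rw [hrange, List.map_map]
  have hconv := pvConv C [] C.flatten (by simp) hC8
  simp only [List.length_nil, Nat.cast_zero] at hconv
  simp only [Function.comp_def]
  rw [hconv]
  -- codeword values
  have hvals : C.map pvPack = (64 + (n / 16) % 16) :: pvNibRun data (n % 16) := by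
    rw [hC, List.map_cons, pvChunks_vals data n hn hb]
    congr 1
    rw [pvPack_eq _ (by
      intro x hx
      fin_cases hx
      exacts [Or.inl rfl, Or.inr rfl, Or.inl rfl, Or.inl rfl, pvBit01 7 n hn,
        pvBit01 6 n hn, pvBit01 5 n hn, pvBit01 4 n hn])]
    norm_num [pvBitsVal]
    rw [pvBit_eq 7 n hn, pvBit_eq 6 n hn, pvBit_eq 5 n hn, pvBit_eq 4 n hn]
    norm_num
    omega
  rw [hvals]
  -- A side: padding loop
  rw [pvPadCw total total.toNat 0 _ (by have := Int.self_le_toNat total; omega)]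
  -- B side
  simp only [pvEncodeB]
  rw [show PySem.Int.floordiv n 16 = n / 16 from
      PySem.Int.floordiv_eq_ediv_of_pos (by norm_num),
    show PySem.Int.mod (n / 16) 16 = (n / 16) % 16 from
      PySem.Int.mod_eq_emod_of_pos (by norm_num),
    show PySem.Int.mod n 16 = n % 16 from
      PySem.Int.mod_eq_emod_of_pos (by norm_num)]
  rw [pvBFold data [64 + (n / 16) % 16] (n % 16)]
  rw [← pvPadMaps]
  simp only [List.singleton_append, List.length_cons]

-- ===== VERDICT (by name: the statement is the Claim_ definition above) =====
theorem encode_data_codewords_spec : Claim_equal_encode_data_codewords := by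
  intro text version hdom hpre
  unfold Spec_encode_data_codewords
  have hb : ∀ b ∈ text.toList.map (fun c => ((c.toNat : Int))), 0 ≤ b ∧ b ≤ 126 := by
    intro b hbm
    rcases List.mem_map.1 hbm with ⟨ch, hch, rfl⟩
    have hdm : pvDomStr text = true := by
      unfold Dom_encode_data_codewords at hdom
      rw [Bool.and_eq_true] at hdom
      exact hdom.1
    unfold pvDomStr at hdm
    rw [List.all_eq_true] at hdm
    have hc := hdm ch hch
    unfold pvDomChar at hc
    simp at hc
    constructor
    · positivity
    · omega
  obtain ⟨h1, h2⟩ := hpre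
  interval_cases version
  · simp only [encode_data_codewords, encode_data_codewords_alt,
      show PySem.Dict.get? pvVersionTable 1 = some (21, 16, 10, 1, 16, 0, 0) from rfl]
    exact pvEncode_eq _ hb 16
  · simp only [encode_data_codewords, encode_data_codewords_alt,
      show PySem.Dict.get? pvVersionTable 2 = some (25, 28, 16, 1, 28, 0, 0) from rfl]
    exact pvEncode_eq _ hb 28
  · simp only [encode_data_codewords, encode_data_codewords_alt,
      show PySem.Dict.get? pvVersionTable 3 = some (29, 44, 26, 1, 44, 0, 0) from rfl]
    exact pvEncode_eq _ hb 44
  · simp only [encode_data_codewords, encode_data_codewords_alt,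
      show PySem.Dict.get? pvVersionTable 4 = some (33, 64, 18, 2, 32, 0, 0) from rfl]
    exact pvEncode_eq _ hb 64
  · simp only [encode_data_codewords, encode_data_codewords_alt,
      show PySem.Dict.get? pvVersionTable 5 = some (37, 86, 24, 2, 43, 0, 0) from rfl]
    exact pvEncode_eq _ hb 86
  · simp only [encode_data_codewords, encode_data_codewords_alt,
      show PySem.Dict.get? pvVersionTable 6 = some (41, 108, 16, 2, 27, 2, 28) from rfl]
    exact pvEncode_eq _ hb 108
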